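-- pv_equiv track=rewrite | github.com/allegra0/WYSAWIS | algo.py | capacite
-- ===== SOURCE A (Python) =====
-- def capacite(length):
--     liste=[0]
--     liste2=[]
--     liste3=[]
--     liste1=[0]
--     k=0
--     m=0
--     n=0
--     diz="0"
--     i=1
--
--     while int(liste[-1])<length:
--         taille=len(str(i))
--         if taille==1:
--             liste.append(i)
--             liste1.append(i)
--
--         elif taille==2:
--             while k<len(liste1):
--                 liste2.append(diz+(str(liste1[k])))
--                 liste.append(diz+(str(liste1[k])))
--                 k+=1
--             liste.append(i)
--             liste2.append(i)
--         elif taille==3: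
--             while m<len(liste2):
--                 liste3.append(diz+(str(liste2[m])))
--                 liste.append(diz+(str(liste2[m])))
--                 m+=1
--             liste.append(i)
--             liste3.append(i)
--         elif taille==4:
--             while n<len(liste3):
--             #liste2.append(diz+(str(liste1[k])))
--                 liste.append(diz+(str(liste3[n])))
--                 n+=1
--             liste.append(i)
--
--
--         #j+=1
--         i+=1
--     return len(liste)
-- ===== SOURCE B (Python) =====
-- def capacite(length):
--     # Closed form: the loop in A appends one entry per i = 1..length, plus one
--     # initial entry, plus a burst of 10 / 100 / 1000 zero-padded copies the
--     # first time i reaches 2 / 3 / 4 digits.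
--     if length < 1:
--         return 1
--     total = 1 + length
--     for t in (10, 100, 1000):
--         if length >= t:
--             total += t
--     return total
-- ===== Notes on version B (the rewrite author's own statement) =====
-- stated objective: alternative
-- what changed: Replaces A's simulation (building four growing lists of padded-number strings until the last appended number reaches length) with a closed form: 1+length plus a +10/+100/+1000 bonus when length reaches 10/100/1000; Pre_ excludes length >= 10000, where A loops forever (it appends nothing once i has 5 digits).
-- outside the precondition, e.g. on capacite(10000): A does not finish within the time limit, B returns 11111
import Mathlib
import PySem

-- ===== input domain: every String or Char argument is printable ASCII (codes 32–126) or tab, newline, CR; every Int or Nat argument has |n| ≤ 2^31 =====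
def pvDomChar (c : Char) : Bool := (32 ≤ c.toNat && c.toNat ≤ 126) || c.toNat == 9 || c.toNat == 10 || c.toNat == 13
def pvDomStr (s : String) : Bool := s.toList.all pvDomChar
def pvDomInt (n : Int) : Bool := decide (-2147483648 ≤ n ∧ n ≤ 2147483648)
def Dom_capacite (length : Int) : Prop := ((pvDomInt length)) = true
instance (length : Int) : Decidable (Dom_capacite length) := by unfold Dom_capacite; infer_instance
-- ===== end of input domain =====

-- B replaces A's list-building simulation by a closed form (1+length plus the
-- 10/100/1000 padded bursts); equivalence of the RETURN value is proved for length ≤ 9999.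

-- ===== PORT A =====
-- A's lists hold Python ints AND strings; an element is one or the other.
abbrev PyVal := Int ⊕ String

-- int(x) for a list element: identity on an int, int-parse on a string.
def pyIntOf (v : PyVal) : Option Int :=
  match v with
  | Sum.inl n => some n
  | Sum.inr s => PySem.Int.ofStr? s

-- str(x) for a list element: str(n) on an int, identity on a string.
def pyStrOf (v : PyVal) : String :=
  match v with
  | Sum.inl n => PySem.Int.toStr n
  | Sum.inr s => s

-- inner 'while k < len(src): dst.append("0"+str(src[k])); liste.append("0"+str(src[k])); k += 1'
-- (fuel: the loop runs len(src) - k times; callers pass fuel = len(src), enough since k ≥ 0 always).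
def innerA (liste dst src : List PyVal) (k : Int) (fuel : Nat) : List PyVal × List PyVal × Int :=
  match fuel with
  | 0 => (liste, dst, k)
  | fuel + 1 =>
    if k < (src.length : Int) then
      let e : PyVal := Sum.inr ("0" ++ pyStrOf ((PySem.List.pyGet? src k).getD (Sum.inl 0)))
      innerA (liste ++ [e]) (dst ++ [e]) src (k + 1) fuel
    else (liste, dst, k)

-- inner 'while n < len(liste3): liste.append("0"+str(liste3[n])); n += 1' (taille==4 branch: only liste grows)
def inner4A (liste src : List PyVal) (n : Int) (fuel : Nat) : List PyVal × Int :=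
  match fuel with
  | 0 => (liste, n)
  | fuel + 1 =>
    if n < (src.length : Int) then
      let e : PyVal := Sum.inr ("0" ++ pyStrOf ((PySem.List.pyGet? src n).getD (Sum.inl 0)))
      inner4A (liste ++ [e]) src (n + 1) fuel
    else (liste, n)

-- the outer 'while int(liste[-1]) < length' loop.  liste is never empty and its last element
-- always int-parses, so the .getD defaults are never taken on reachable states.  When length ≤ 9999
-- the loop performs at most 10000 condition checks, so fuel 10001 (set in 'capacite') is never
-- exhausted inside Pre_; A itself loops forever for larger length (the 'no branch' case below).
def loopA (fuel : Nat) (length : Int) (liste liste1 liste2 liste3 : List PyVal)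
    (k m n i : Int) : Int :=
  match fuel with
  | 0 => (liste.length : Int)
  | fuel + 1 =>
    if ((PySem.List.pyGet? liste (-1)).bind pyIntOf).getD 0 < length then
      let taille : Int := ((PySem.Int.toChars i).length : Int)   -- len(str(i))
      if taille = 1 then
        loopA fuel length (liste ++ [Sum.inl i]) (liste1 ++ [Sum.inl i]) liste2 liste3 k m n (i + 1)
      else if taille = 2 then
        let r := innerA liste liste2 liste1 k liste1.length
        loopA fuel length (r.1 ++ [Sum.inl i]) liste1 (r.2.1 ++ [Sum.inl i]) liste3 r.2.2 m n (i + 1)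
      else if taille = 3 then
        let r := innerA liste liste3 liste2 m liste2.length
        loopA fuel length (r.1 ++ [Sum.inl i]) liste1 liste2 (r.2.1 ++ [Sum.inl i]) k r.2.2 n (i + 1)
      else if taille = 4 then
        let r := inner4A liste liste3 n liste3.length
        loopA fuel length (r.1 ++ [Sum.inl i]) liste1 liste2 liste3 k m r.2 (i + 1)
      else  -- taille ≥ 5: Python appends nothing and the loop never terminates (outside Pre_)
        loopA fuel length liste liste1 liste2 liste3 k m n (i + 1)
    else (liste.length : Int)

def capacite (length : Int) : Int :=
  loopA 10001 length [Sum.inl 0] [Sum.inl 0] [] [] 0 0 0 1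

-- ===== PORT B =====
def capacite_alt (length : Int) : Int :=
  if length < 1 then 1
  else [(10 : Int), 100, 1000].foldl
    (fun total t => if t ≤ length then total + t else total) (1 + length)

-- ===== PRECONDITION & SPEC =====
-- Pre_ excludes exactly length ≥ 10000: there A's while-loop never terminates (once i has
-- 5 digits no branch appends anything, so int(liste[-1]) stays 9999 forever).
def Pre_capacite (length : Int) : Prop := length ≤ 9999
instance (length : Int) : Decidable (Pre_capacite length) := by unfold Pre_capacite; infer_instance

def pvWitness_capacite : Int := (12)

def Spec_capacite (length : Int) (out : Int) : Prop := out = capacite_alt length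
instance (length : Int) (out : Int) : Decidable (Spec_capacite length out) := by unfold Spec_capacite; infer_instance

-- ===== CLAIM (what is proved, stated in full; the proofs are below) =====
def Claim_equal_capacite : Prop := ∀ (length : Int), Dom_capacite length → Pre_capacite length → Spec_capacite length (capacite length)

-- ===== LEMMAS AND PROOFS =====

-- closed form for len(liste) once the loop has consumed all i ≤ j
def F (j : Int) : Int :=
  1 + j + (if 10 ≤ j then 10 else 0) + (if 100 ≤ j then 100 else 0) + (if 1000 ≤ j then 1000 else 0)

-- loop invariant at the condition check with counter i (iterations 1..i-1 done)
def StInv (i : Int) (liste liste1 liste2 liste3 : List PyVal) (k m n : Int) : Prop :=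
  liste.getLast? = some (Sum.inl (i - 1)) ∧
  (liste.length : Int) = F (i - 1) ∧
  (liste1.length : Int) = 1 + min (i - 1) 9 ∧
  k = (if 10 ≤ i - 1 then (10 : Int) else 0) ∧
  (liste2.length : Int) = (if i - 1 < 10 then 0 else if i - 1 < 100 then i else 100) ∧
  m = (if 100 ≤ i - 1 then (100 : Int) else 0) ∧
  (liste3.length : Int) = (if i - 1 < 100 then 0 else if i - 1 < 1000 then i else 1000) ∧
  n = (if 1000 ≤ i - 1 then (1000 : Int) else 0)

-- lower bound on decimal length: n < 10 ^ len(str(n))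
lemma lt_pow_toDigitsCore (f : Nat) : ∀ n : Nat, n < f → n < 10 ^ (Nat.toDigitsCore 10 f n []).length := by
  induction f with
  | zero => intro n h; omega
  | succ f ih =>
    intro n h
    simp only [Nat.toDigitsCore]
    by_cases h10 : n / 10 = 0
    · simp only [h10, if_pos]
      simpa using by omega
    · rw [if_neg h10, Nat.toDigitsCore_lens_eq]
      have hlt : n / 10 < f := by omega
      have := ih (n / 10) hlt
      calc n < (n / 10 + 1) * 10 := by omega
        _ ≤ 10 ^ (Nat.toDigitsCore 10 f (n / 10) []).length * 10 := by
              exact Nat.mul_le_mul_right 10 (by omega)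
        _ = 10 ^ ((Nat.toDigitsCore 10 f (n / 10) []).length + 1) := by rw [pow_succ]

lemma toChars_length_eq (i : Int) (e : Nat) (h1 : ((10 ^ e : Nat) : Int) ≤ i)
    (h2 : i < ((10 ^ (e + 1) : Nat) : Int)) : (PySem.Int.toChars i).length = e + 1 := by
  have hpos : 0 < (10 : Nat) ^ e := (by positivity)
  have hi0 : ¬ i < 0 := by omega
  have hlo : 10 ^ e ≤ i.toNat := by omega
  have hhi : i.toNat < 10 ^ (e + 1) := by omega
  simp only [PySem.Int.toChars, if_neg hi0]
  have hub : (Nat.toDigits 10 i.toNat).length ≤ e + 1 :=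
    Nat.toDigits_length 10 i.toNat (e + 1) (by omega) hhi
  have hlb : i.toNat < 10 ^ (Nat.toDigits 10 i.toNat).length :=
    lt_pow_toDigitsCore (i.toNat + 1) i.toNat (by omega)
  have : e < (Nat.toDigits 10 i.toNat).length := by
    by_contra hc
    simp only [not_lt] at hc
    exact absurd (lt_of_le_of_lt hlo hlb)
      (not_lt.mpr (Nat.pow_le_pow_right (by omega) hc))
  omega

lemma innerA_spec (fuel : Nat) : ∀ (liste dst src : List PyVal) (k : Int),
    0 ≤ k → k ≤ (src.length : Int) → (src.length : Int) ≤ k + fuel →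
    ((innerA liste dst src k fuel).1.length : Int) = liste.length + (src.length - k) ∧
    ((innerA liste dst src k fuel).2.1.length : Int) = dst.length + (src.length - k) ∧
    (innerA liste dst src k fuel).2.2 = (src.length : Int) := by
  induction fuel with
  | zero =>
    intro liste dst src k h0 hle hf
    have : k = (src.length : Int) := by omega
    simp [innerA, this]
  | succ fuel ih =>
    intro liste dst src k h0 hle hf
    simp only [innerA]
    by_cases hk : k < (src.length : Int)
    · rw [if_pos hk]
      obtain ⟨e1, e2, e3⟩ := ih (liste ++ [_]) (dst ++ [_]) src (k + 1)
        (by omega) (by omega) (by omega)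
      refine ⟨?_, ?_, e3⟩
      · rw [e1]; simp; omega
      · rw [e2]; simp; omega
    · rw [if_neg hk]
      have : k = (src.length : Int) := by omega
      simp [this]

lemma inner4A_spec (fuel : Nat) : ∀ (liste src : List PyVal) (n : Int),
    0 ≤ n → n ≤ (src.length : Int) → (src.length : Int) ≤ n + fuel →
    ((inner4A liste src n fuel).1.length : Int) = liste.length + (src.length - n) ∧
    (inner4A liste src n fuel).2 = (src.length : Int) := by
  induction fuel with
  | zero =>
    intro liste src n h0 hle hf
    have : n = (src.length : Int) := by omega
    simp [inner4A, this]
  | succ fuel ih =>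
    intro liste src n h0 hle hf
    simp only [inner4A]
    by_cases hn : n < (src.length : Int)
    · rw [if_pos hn]
      obtain ⟨e1, e2⟩ := ih (liste ++ [_]) src (n + 1) (by omega) (by omega) (by omega)
      refine ⟨?_, e2⟩
      rw [e1]; simp; omega
    · rw [if_neg hn]
      have : n = (src.length : Int) := by omega
      simp [this]

lemma loopA_stop (fuel : Nat) (length : Int) (liste liste1 liste2 liste3 : List PyVal)
    (k m n i : Int)
    (h : ¬ (((PySem.List.pyGet? liste (-1)).bind pyIntOf).getD 0 < length)) :
    loopA (fuel + 1) length liste liste1 liste2 liste3 k m n i = (liste.length : Int) := by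
  simp only [loopA, if_neg h]

lemma loopA_spec (fuel : Nat) : ∀ (length i : Int) (liste liste1 liste2 liste3 : List PyVal)
    (k m n : Int),
    StInv i liste liste1 liste2 liste3 k m n →
    1 ≤ i → i ≤ length + 1 → length ≤ 9999 →
    (length + 2 - i).toNat ≤ fuel →
    loopA fuel length liste liste1 liste2 liste3 k m n i = F length := by
  induction fuel with
  | zero =>
    intro length i _ _ _ _ _ _ _ _ h1 h2 _ hf
    omega
  | succ fuel ih =>
    intro length i liste liste1 liste2 liste3 k m n hInv h1 h2 h9999 hf
    obtain ⟨hlast, hL, hL1, hk, hL2, hm, hL3, hn⟩ := hInv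
    have hcond : ((PySem.List.pyGet? liste (-1)).bind pyIntOf).getD 0 = i - 1 := by
      rw [PySem.List.pyGet?_neg_one, hlast]; rfl
    simp only [loopA, hcond]
    by_cases hlt : i - 1 < length
    · rw [if_pos hlt]
      have hi9999 : i ≤ 9999 := by omega
      have hii : i + 1 - 1 = i := by ring
      rcases Int.lt_or_le i 10 with hc1 | hc1
      · -- taille == 1
        have ht : (PySem.Int.toChars i).length = 1 :=
          toChars_length_eq i 0 (by push_cast; omega) (by push_cast; omega)
        simp only [ht]
        norm_num
        refine ih length (i + 1) _ _ _ _ _ _ _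
          ⟨?_, ?_, ?_, ?_, ?_, ?_, ?_, ?_⟩ (by omega) (by omega) h9999 (by omega) <;>
          simp only [List.getLast?_concat, List.length_append, List.length_cons,
            List.length_nil, hii]
        · push_cast; unfold F at hL ⊢; split_ifs at hL ⊢ <;> omega
        · push_cast; omega
        · rw [hk]; split_ifs <;> omega
        · split_ifs at hL2 ⊢ <;> omega
        · rw [hm]; split_ifs <;> omega
        · split_ifs at hL3 ⊢ <;> omega
        · rw [hn]; split_ifs <;> omega
      · rcases Int.lt_or_le i 100 with hc2 | hc2
        · -- taille == 2
          have ht : (PySem.Int.toChars i).length = 2 :=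
            toChars_length_eq i 1 (by push_cast; omega) (by push_cast; omega)
          simp only [ht]
          norm_num
          have hk0 : 0 ≤ k := by rw [hk]; split_ifs <;> omega
          have hkle : k ≤ (liste1.length : Int) := by
            rw [hk] at *; split_ifs at * <;> omega
          obtain ⟨e1, e2, e3⟩ := innerA_spec liste1.length liste liste2 liste1 k
            hk0 hkle (by omega)
          refine ih length (i + 1) _ _ _ _ _ _ _
            ⟨?_, ?_, ?_, ?_, ?_, ?_, ?_, ?_⟩ (by omega) (by omega) h9999 (by omega) <;>
            simp only [List.getLast?_concat, List.length_append, List.length_cons,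
              List.length_nil, hii]
          · push_cast; rw [e1]; unfold F at hL ⊢
            split_ifs at hL hk ⊢ <;> omega
          · omega
          · rw [e3]; split_ifs; omega
          · push_cast; rw [e2]; split_ifs at hL2 hk ⊢ <;> omega
          · rw [hm]; split_ifs <;> omega
          · split_ifs at hL3 ⊢ <;> omega
          · rw [hn]; split_ifs <;> omega
        · rcases Int.lt_or_le i 1000 with hc3 | hc3
          · -- taille == 3
            have ht : (PySem.Int.toChars i).length = 3 :=
              toChars_length_eq i 2 (by push_cast; omega) (by push_cast; omega)
            simp only [ht]
            norm_num
            have hm0 : 0 ≤ m := by rw [hm]; split_ifs <;> omega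
            have hmle : m ≤ (liste2.length : Int) := by
              rw [hm] at *; split_ifs at * <;> omega
            obtain ⟨e1, e2, e3⟩ := innerA_spec liste2.length liste liste3 liste2 m
              hm0 hmle (by omega)
            refine ih length (i + 1) _ _ _ _ _ _ _
              ⟨?_, ?_, ?_, ?_, ?_, ?_, ?_, ?_⟩ (by omega) (by omega) h9999 (by omega) <;>
              simp only [List.getLast?_concat, List.length_append, List.length_cons,
                List.length_nil, hii]
            · push_cast; rw [e1]; unfold F at hL ⊢
              split_ifs at hL hL2 ⊢ <;> omega
            · omega
            · rw [hk]; split_ifs <;> omega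
            · split_ifs at hL2 ⊢ <;> omega
            · rw [e3]; split_ifs at hL2 ⊢ <;> omega
            · push_cast; rw [e2]; split_ifs at hL3 hL2 ⊢ <;> omega
            · rw [hn]; split_ifs <;> omega
          · -- taille == 4
            have ht : (PySem.Int.toChars i).length = 4 :=
              toChars_length_eq i 3 (by push_cast; omega) (by push_cast; omega)
            simp only [ht]
            norm_num
            have hn0 : 0 ≤ n := by rw [hn]; split_ifs <;> omega
            have hnle : n ≤ (liste3.length : Int) := by
              rw [hn] at *; split_ifs at * <;> omega
            obtain ⟨e1, e2⟩ := inner4A_spec liste3.length liste liste3 n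
              hn0 hnle (by omega)
            refine ih length (i + 1) _ _ _ _ _ _ _
              ⟨?_, ?_, ?_, ?_, ?_, ?_, ?_, ?_⟩ (by omega) (by omega) h9999 (by omega) <;>
              simp only [List.getLast?_concat, List.length_append, List.length_cons,
                List.length_nil, hii]
            · push_cast; rw [e1]; unfold F at hL ⊢
              split_ifs at hL hL3 ⊢ <;> omega
            · omega
            · rw [hk]; split_ifs <;> omega
            · split_ifs at hL2 ⊢ <;> omega
            · rw [hm]; split_ifs <;> omega
            · split_ifs at hL3 ⊢ <;> omega
            · rw [e2]; split_ifs at hL3 ⊢ <;> omega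
    · rw [if_neg hlt]
      have : i = length + 1 := by omega
      rw [hL, this]; ring_nf

-- ===== VERDICT (by name: the statement is the Claim_ definition above) =====
theorem capacite_spec : Claim_equal_capacite := by
  intro length _ hpre
  unfold Pre_capacite at hpre
  unfold Spec_capacite capacite
  rcases Int.lt_or_le length 1 with hneg | hpos
  · have h0 : ¬ (((PySem.List.pyGet? [(Sum.inl 0 : PyVal)] (-1)).bind pyIntOf).getD 0 < length) := by
      simp [PySem.List.pyGet?_neg_one, pyIntOf]; omega
    rw [show (10001 : Nat) = 10000 + 1 from rfl, loopA_stop _ _ _ _ _ _ _ _ _ _ h0]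
    unfold capacite_alt
    rw [if_pos hneg]
    norm_num
  · have := loopA_spec 10001 length 1 [Sum.inl 0] [Sum.inl 0] [] [] 0 0 0
      (by unfold StInv F; norm_num) (by omega) (by omega) (by omega) (by omega)
    rw [this]
    unfold F capacite_alt
    rw [if_neg (show ¬ length < 1 by omega)]
    simp only [List.foldl]
    by_cases H1 : (10 : Int) ≤ length <;> by_cases H2 : (100 : Int) ≤ length <;>
      by_cases H3 : (1000 : Int) ≤ length <;> simp [H1, H2, H3]
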